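-- pv_equiv track=rewrite | github.com/Bendemeurichy/scripting2022 | week5/de_parsons_code.py | maximale_afwijking
-- ===== SOURCE A (Python) =====
-- def maximale_afwijking(code):
--     hoogte = [0]
--     choogte = 0
--     for el in code.upper():
--         if el == "U":
--             choogte += 1
--             hoogte.append(choogte)
--         elif el == "D":
--             choogte -= 1
--             hoogte.append(choogte)
--     return min(hoogte), max(hoogte)
-- ===== SOURCE B (Python) =====
-- def maximale_afwijking(code):
--     cur = lo = hi = 0
--     for el in code.upper():
--         if el == "U":
--             cur += 1
--         elif el == "D":
--             cur -= 1
--         else: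
--             continue
--         if cur < lo:
--             lo = cur
--         elif cur > hi:
--             hi = cur
--     return lo, hi
-- ===== Notes on version B (the rewrite author's own statement) =====
-- stated objective: simpler
-- what changed: B streams the running height and updates the min/max extrema incrementally in one pass with O(1) memory, instead of materializing the whole height list and scanning it twice with min() and max().
import Mathlib
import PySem

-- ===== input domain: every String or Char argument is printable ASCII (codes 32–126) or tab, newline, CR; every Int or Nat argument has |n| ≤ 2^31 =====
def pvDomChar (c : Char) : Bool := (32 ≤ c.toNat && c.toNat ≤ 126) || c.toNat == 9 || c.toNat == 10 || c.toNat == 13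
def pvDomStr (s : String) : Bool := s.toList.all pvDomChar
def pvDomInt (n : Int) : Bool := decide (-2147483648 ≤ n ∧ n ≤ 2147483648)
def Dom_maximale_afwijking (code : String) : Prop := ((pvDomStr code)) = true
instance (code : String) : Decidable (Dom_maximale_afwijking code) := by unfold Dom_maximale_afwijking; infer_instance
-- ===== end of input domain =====

-- B replaces A's materialized height list scanned twice by min()/max() with a one-pass
-- stream that updates the running extrema in place (objective: simpler, O(1) memory).

-- ===== PORT A =====
-- one iteration of A's loop body: state = (choogte, hoogte)
def pvStepA (s : Int × List Int) (el : Char) : Int × List Int :=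
  if el = 'U' then (s.1 + 1, s.2 ++ [s.1 + 1])
  else if el = 'D' then (s.1 - 1, s.2 ++ [s.1 - 1])
  else s

def maximale_afwijking (code : String) : Int × Int :=
  let st := (PySem.Str.upper code).toList.foldl pvStepA (0, [0])
  -- hoogte starts as [0] and only grows, so min()/max() never see an empty list;
  -- the .getD 0 default is unreachable
  ((PySem.List.min? st.2 (fun y => y)).getD 0, (PySem.List.max? st.2 (fun y => y)).getD 0)

-- ===== PORT B =====
-- one iteration of B's loop body: state = (cur, lo, hi)
def pvStepB (s : Int × Int × Int) (el : Char) : Int × Int × Int :=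
  if el = 'U' then
    let cur := s.1 + 1
    (cur, if cur < s.2.1 then cur else s.2.1, if cur > s.2.2 then cur else s.2.2)
  else if el = 'D' then
    let cur := s.1 - 1
    (cur, if cur < s.2.1 then cur else s.2.1, if cur > s.2.2 then cur else s.2.2)
  else s

def maximale_afwijking_alt (code : String) : Int × Int :=
  let st := (PySem.Str.upper code).toList.foldl pvStepB (0, 0, 0)
  (st.2.1, st.2.2)

-- ===== PRECONDITION & SPEC =====
def Spec_maximale_afwijking (code : String) (out : Int × Int) : Prop := out = maximale_afwijking_alt code
instance (code : String) (out : Int × Int) : Decidable (Spec_maximale_afwijking code out) := by unfold Spec_maximale_afwijking; infer_instance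

-- ===== CLAIM (what is proved, stated in full; the proofs are below) =====
def Claim_equal_maximale_afwijking : Prop := ∀ (code : String), Dom_maximale_afwijking code → Spec_maximale_afwijking code (maximale_afwijking code)

-- ===== LEMMAS AND PROOFS =====

-- Loop invariant: A's list state is x :: t (nonempty), and B's extrema are the
-- running fold of min/max over that same list.
lemma pv_loop (cs : List Char) : ∀ (c x : Int) (t : List Int),
    (let sA := cs.foldl pvStepA (c, x :: t)
     let sB := cs.foldl pvStepB (c, t.foldl min x, t.foldl max x)
     ((PySem.List.min? sA.2 (fun y => y)).getD 0, (PySem.List.max? sA.2 (fun y => y)).getD 0)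
       = (sB.2.1, sB.2.2)) := by
  induction cs with
  | nil =>
    intro c x t
    simp [PySem.List.min?_id_cons, PySem.List.max?_id_cons]
  | cons e cs ih =>
    intro c x t
    by_cases hU : e = 'U'
    · have h1 : (if c + 1 < t.foldl min x then c + 1 else t.foldl min x)
          = (t ++ [c + 1]).foldl min x := by
        simp [List.foldl_append, min_def]
        split_ifs <;> omega
      have h2 : (if c + 1 > t.foldl max x then c + 1 else t.foldl max x)
          = (t ++ [c + 1]).foldl max x := by
        simp [List.foldl_append, max_def]
        split_ifs <;> omega
      simp only [List.foldl_cons, pvStepA, pvStepB, hU, if_pos]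
      rw [h1, h2]
      exact ih (c + 1) x (t ++ [c + 1])
    · by_cases hD : e = 'D'
      · have h1 : (if c - 1 < t.foldl min x then c - 1 else t.foldl min x)
            = (t ++ [c - 1]).foldl min x := by
          simp [List.foldl_append, min_def]
          split_ifs <;> omega
        have h2 : (if c - 1 > t.foldl max x then c - 1 else t.foldl max x)
            = (t ++ [c - 1]).foldl max x := by
          simp [List.foldl_append, max_def]
          split_ifs <;> omega
        simp only [List.foldl_cons, pvStepA, pvStepB, hD, if_pos,
          reduceCtorEq]
        rw [h1, h2]
        exact ih (c - 1) x (t ++ [c - 1])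
      · simpa [pvStepA, pvStepB, hU, hD] using ih c x t

-- ===== VERDICT (by name: the statement is the Claim_ definition above) =====
theorem maximale_afwijking_spec : Claim_equal_maximale_afwijking := by
  intro code _
  unfold Spec_maximale_afwijking maximale_afwijking maximale_afwijking_alt
  simpa using pv_loop (PySem.Str.upper code).toList 0 0 []
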